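-- pv_equiv track=rewrite | github.com/Patronussss/Attack-for-Middleware-Systems | attack1.py | find_unique_rows_withNone
-- ===== SOURCE A (Python) =====
-- def find_unique_rows_withNone(matrix):
--    # 使用字典来存储行数据及其出现次数
--     row_count = {}
--     unique_rows = []
--
--     for row in matrix:
--         serial_number = row[0]
--         row_data = tuple(row[1:])
--
--         # 检查当前行是否包含 None
--         if None not in row_data:
--             if row_data in row_count:
--                 row_count[row_data].append(serial_number)
--             else:
--                 row_count[row_data] = [serial_number]
--
--     # 找出仅出现一次的行
--     for row_data, serial_numbers in row_count.items():
--         if len(serial_numbers) == 1: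
--             unique_rows.extend(serial_numbers)
--
--     return unique_rows
-- ===== SOURCE B (Python) =====
-- def find_unique_rows_withNone(matrix):
--     # Pass 1: count occurrences of each None-free data tuple.
--     counts = {}
--     for row in matrix:
--         data = tuple(row[1:])
--         if None not in data:
--             counts[data] = counts.get(data, 0) + 1
--     # Pass 2: re-scan the matrix in order, keeping serials of rows whose data occurs exactly once.
--     result = []
--     for row in matrix:
--         data = tuple(row[1:])
--         if None not in data and counts[data] == 1:
--             result.append(row[0])
--     return result
-- ===== Notes on version B (the rewrite author's own statement) =====
-- stated objective: alternative
-- what changed: B replaces A's dict-of-serial-lists (grouping serials per data tuple, then emitting singleton groups in dict order) by a plain occurrence counter built in one pass plus a second pass over the original matrix that emits row[0] whenever the row's None-free data tuple has count exactly 1.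
-- outside the precondition, e.g. on find_unique_rows_withNone([[None]]): A returns [None], B returns [None]
import Mathlib
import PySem

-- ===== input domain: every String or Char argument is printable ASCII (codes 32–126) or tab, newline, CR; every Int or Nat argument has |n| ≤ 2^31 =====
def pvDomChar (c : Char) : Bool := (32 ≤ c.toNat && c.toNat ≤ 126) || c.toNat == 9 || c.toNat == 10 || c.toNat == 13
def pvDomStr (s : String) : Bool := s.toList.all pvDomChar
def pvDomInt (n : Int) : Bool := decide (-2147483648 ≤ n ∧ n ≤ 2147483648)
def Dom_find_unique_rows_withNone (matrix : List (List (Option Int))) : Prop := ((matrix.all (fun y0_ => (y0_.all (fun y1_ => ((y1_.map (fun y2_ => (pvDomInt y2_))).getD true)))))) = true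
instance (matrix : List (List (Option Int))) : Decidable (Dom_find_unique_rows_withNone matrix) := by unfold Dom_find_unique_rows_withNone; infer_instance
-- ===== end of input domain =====

-- B replaces A's dict of per-data-tuple serial lists by an occurrence counter plus a second scan
-- of the matrix that emits the serials of count-1 rows (objective: alternative decomposition).

-- ===== PORT A =====
-- A's loop body: serial_number = row[0]; row_data = tuple(row[1:]); group serials per data tuple.
-- row[0] is read with pyGet?; under Pre_ every selected serial is an int, so the Int default 0 is never observable.
def pvStepA (d : PySem.Dict (List (Option Int)) (List Int)) (row : List (Option Int)) :
    PySem.Dict (List (Option Int)) (List Int) :=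
  if ¬ (none ∈ PySem.List.slice row (some 1) none) then
    (if d.contains (PySem.List.slice row (some 1) none) then
       d.modify (PySem.List.slice row (some 1) none) [] (fun v => v ++ [((PySem.List.pyGet? row 0).getD none).getD 0])
     else d.insert (PySem.List.slice row (some 1) none) [((PySem.List.pyGet? row 0).getD none).getD 0])
  else d

def find_unique_rows_withNone (matrix : List (List (Option Int))) : List Int :=
  ((matrix.foldl pvStepA PySem.Dict.empty).items).foldl
    (fun acc p => if p.2.length = 1 then acc ++ p.2 else acc) []

-- ===== PORT B =====
-- B pass 1: counts[data] = counts.get(data, 0) + 1 for None-free data tuples.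
def pvStepB (d : PySem.Dict (List (Option Int)) Int) (row : List (Option Int)) :
    PySem.Dict (List (Option Int)) Int :=
  if ¬ (none ∈ PySem.List.slice row (some 1) none) then
    d.insert (PySem.List.slice row (some 1) none) (d.getD (PySem.List.slice row (some 1) none) 0 + 1)
  else d

def find_unique_rows_withNone_alt (matrix : List (List (Option Int))) : List Int :=
  let counts := matrix.foldl pvStepB PySem.Dict.empty
  matrix.foldl
    (fun acc row =>
      if ¬ (none ∈ PySem.List.slice row (some 1) none) ∧
         counts.getD (PySem.List.slice row (some 1) none) 0 = 1 then
        acc ++ [((PySem.List.pyGet? row 0).getD none).getD 0]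
      else acc) []

-- ===== PRECONDITION & SPEC =====
-- Pre_ excludes matrices with an empty row (A raises IndexError on row[0]) and matrices containing a
-- unique None-free row whose serial number is None (A returns a list containing None, which is not a
-- value of the declared return type List Int; B returns the same list there).
def Pre_find_unique_rows_withNone (matrix : List (List (Option Int))) : Prop :=
  ∀ row ∈ matrix, row ≠ [] ∧
    (row.head? = some none →
      none ∈ row.tail ∨ matrix.countP (fun r => r.tail == row.tail) ≠ 1)
instance (matrix : List (List (Option Int))) : Decidable (Pre_find_unique_rows_withNone matrix) := by
  unfold Pre_find_unique_rows_withNone; infer_instance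

def pvWitness_find_unique_rows_withNone : List (List (Option Int)) :=
  [[some 1, some 2], [some 3, some 2], [some 4, none], [some 5]]

def Spec_find_unique_rows_withNone (matrix : List (List (Option Int))) (out : List Int) : Prop := out = find_unique_rows_withNone_alt matrix
instance (matrix : List (List (Option Int))) (out : List Int) : Decidable (Spec_find_unique_rows_withNone matrix out) := by unfold Spec_find_unique_rows_withNone; infer_instance

-- ===== CLAIM (what is proved, stated in full; the proofs are below) =====
def Claim_equal_find_unique_rows_withNone : Prop := ∀ (matrix : List (List (Option Int))), Dom_find_unique_rows_withNone matrix → Pre_find_unique_rows_withNone matrix → Spec_find_unique_rows_withNone matrix (find_unique_rows_withNone matrix)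

-- ===== LEMMAS AND PROOFS =====

-- row[0] coerced to Int (the value A stores as a serial number)
def pvHead (r : List (Option Int)) : Int := ((PySem.List.pyGet? r 0).getD none).getD 0

-- serials of the None-free rows of `rest` whose data tuple is `t`, in order
def pvSerials (rest : List (List (Option Int))) (t : List (Option Int)) : List Int :=
  rest.flatMap (fun r => if ¬ (none ∈ r.tail) ∧ r.tail = t then [pvHead r] else [])

-- keep a serial list iff it is a singleton
def pvSel (l : List Int) : List Int := if l.length = 1 then l else []

theorem pvSerials_cons (r : List (Option Int)) (rest : List (List (Option Int)))
    (t : List (Option Int)) :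
    pvSerials (r :: rest) t =
      (if ¬ (none ∈ r.tail) ∧ r.tail = t then [pvHead r] else []) ++ pvSerials rest t := by
  simp [pvSerials]

theorem pvFlatMap_congr {α β : Type} {l : List α} {f g : α → List β}
    (h : ∀ x ∈ l, f x = g x) : l.flatMap f = l.flatMap g := by
  induction l with
  | nil => rfl
  | cons x xs ih =>
      simp only [List.flatMap_cons]
      rw [h x (by simp), ih (fun y hy => h y (by simp [hy]))]

theorem pvSerials_ne_nil {rest : List (List (Option Int))} {r : List (Option Int)}
    (hr : r ∈ rest) (hok : ¬ (none ∈ r.tail)) : pvSerials rest r.tail ≠ [] := by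
  intro hnil
  rw [pvSerials, List.flatMap_eq_nil_iff] at hnil
  have := hnil r hr
  simp [hok] at this

-- A's second loop as a flatMap
theorem pvExtract (l : List ((List (Option Int)) × List Int)) (acc : List Int) :
    l.foldl (fun acc p => if p.2.length = 1 then acc ++ p.2 else acc) acc =
      acc ++ l.flatMap (fun p => pvSel p.2) := by
  induction l generalizing acc with
  | nil => simp
  | cons p l ih => by_cases h : p.2.length = 1 <;> simp [h, ih, pvSel]

-- B's second loop as a flatMap
theorem pvFold2 (counts : PySem.Dict (List (Option Int)) Int)
    (rest : List (List (Option Int))) (acc : List Int) :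
    rest.foldl
      (fun acc row =>
        if ¬ (none ∈ row.tail) ∧ counts.getD row.tail 0 = 1 then
          acc ++ [((PySem.List.pyGet? row 0).getD none).getD 0]
        else acc) acc =
    acc ++ rest.flatMap (fun r =>
        if ¬ (none ∈ r.tail) ∧ counts.getD r.tail 0 = 1 then [pvHead r] else []) := by
  induction rest generalizing acc with
  | nil => simp
  | cons r rest ih =>
      simp only [List.foldl_cons, List.flatMap_cons]
      by_cases h : ¬ (none ∈ r.tail) ∧ counts.getD r.tail 0 = 1 <;> simp [h, ih, pvHead]

-- B's counter computes the number of None-free occurrences of each data tuple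
theorem pvCounts (rest : List (List (Option Int))) (d : PySem.Dict (List (Option Int)) Int)
    (t : List (Option Int)) :
    (rest.foldl pvStepB d).getD t 0 = d.getD t 0 + ((pvSerials rest t).length : Int) := by
  induction rest generalizing d with
  | nil => simp [pvSerials]
  | cons r rest ih =>
      simp only [List.foldl_cons, pvStepB, PySem.List.slice_from_one, pvSerials_cons]
      by_cases hok : none ∈ r.tail
      · simp [hok, ih]
      · by_cases ht : r.tail = t
        · subst ht
          simp [hok, ih]
          ring
        · simp [hok, ht, ih, PySem.Dict.getD_insert, Ne.symm ht]

theorem pvModify_eq_insert {κ ν : Type} [BEq κ] (d : PySem.Dict κ ν) (k : κ) (d0 : ν)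
    (f : ν → ν) : d.modify k d0 f = d.insert k (f (d.getD k d0)) := rfl

-- main invariant of A's grouping loop
theorem pvMainA (rest : List (List (Option Int)))
    (d : PySem.Dict (List (Option Int)) (List Int)) (hnd : d.keys.Nodup) :
    (rest.foldl pvStepA d).items.flatMap (fun p => pvSel p.2) =
      d.items.flatMap (fun p => pvSel (p.2 ++ pvSerials rest p.1)) ++
      rest.flatMap (fun r =>
        if ¬ (none ∈ r.tail) ∧ r.tail ∉ d.keys ∧ (pvSerials rest r.tail).length = 1
        then [pvHead r] else []) := by
  induction rest generalizing d with
  | nil => simp [pvSerials]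
  | cons r rest ih =>
      simp only [List.foldl_cons, List.flatMap_cons]
      by_cases hok : none ∈ r.tail
      · have hstep : pvStepA d r = d := by
          simp [pvStepA, PySem.List.slice_from_one, hok]
        have hs : ∀ t, pvSerials (r :: rest) t = pvSerials rest t := by
          intro t; rw [pvSerials_cons]; simp [hok]
        rw [hstep, ih d hnd]
        simp [hs, hok]
      · by_cases hc : d.contains r.tail
        · -- existing key: the serial is appended to its group
          have hstep : pvStepA d r =
              d.insert r.tail (d.getD r.tail [] ++ [pvHead r]) := by
            simp [pvStepA, PySem.List.slice_from_one, hok, hc, pvModify_eq_insert, pvHead]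
          have hmem : r.tail ∈ d.keys := (PySem.Dict.contains_iff_mem_keys d r.tail).mp hc
          rw [hstep, ih _ (PySem.Dict.nodup_keys_insert d _ _ hnd)]
          congr 1
          · rw [PySem.Dict.items_insert_of_contains d _ hc, List.flatMap_map]
            apply pvFlatMap_congr
            intro p hp
            by_cases hp1 : p.1 = r.tail
            · have hv : d.getD r.tail [] = p.2 := by
                apply PySem.Dict.getD_of_mem_items d _ hnd
                rw [← hp1]; exact hp
              simp only [hp1, beq_self_eq_true, if_true, hv, pvSerials_cons]
              simp [hok, List.append_assoc]
            · have : (p.1 == r.tail) = false := by simp [hp1]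
              simp only [this, Bool.false_eq_true, if_false, pvSerials_cons]
              simp [hok, Ne.symm hp1]
          · have hk : (d.insert r.tail (d.getD r.tail [] ++ [pvHead r])).keys = d.keys :=
              PySem.Dict.keys_insert_of_contains d _ hc
            rw [hk]
            have hhead : (if ¬ (none ∈ r.tail) ∧ r.tail ∉ d.keys ∧
                (pvSerials (r :: rest) r.tail).length = 1 then [pvHead r] else []) = [] := by
              simp [hmem]
            rw [hhead, List.nil_append]
            apply pvFlatMap_congr
            intro r' hr'
            by_cases ht : r'.tail = r.tail
            · simp [ht, hmem]
            · rw [pvSerials_cons]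
              simp [Ne.symm ht]
        · -- fresh key: appended at the end of the dict
          have hstep : pvStepA d r = d.insert r.tail [pvHead r] := by
            simp [pvStepA, PySem.List.slice_from_one, hok, hc, pvHead]
          have hmem : r.tail ∉ d.keys := by
            intro h
            rw [← PySem.Dict.contains_iff_mem_keys] at h
            simp [hc] at h
          rw [hstep, ih _ (PySem.Dict.nodup_keys_insert d _ _ hnd)]
          rw [PySem.Dict.items_insert_of_not_contains d _ (by simpa using hc)]
          rw [List.flatMap_append]
          have hmid : (([(r.tail, [pvHead r])] : List ((List (Option Int)) × List Int)).flatMap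
              (fun p => pvSel (p.2 ++ pvSerials rest p.1))) =
              (if ¬ (none ∈ r.tail) ∧ r.tail ∉ d.keys ∧
                  (pvSerials (r :: rest) r.tail).length = 1 then [pvHead r] else []) := by
            rw [pvSerials_cons]
            by_cases hs : pvSerials rest r.tail = [] <;>
              simp [pvSel, hs, hok, hmem, List.length_eq_zero_iff]
          rw [List.append_assoc, hmid]
          congr 1
          · apply pvFlatMap_congr
            intro p hp
            have hp1 : p.1 ≠ r.tail := by
              intro h
              exact hmem (h ▸ PySem.Dict.mem_keys_of_mem_items d hp)
            rw [pvSerials_cons]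
            simp [Ne.symm hp1]
          · congr 1
            apply pvFlatMap_congr
            intro r' hr'
            by_cases ht : r'.tail = r.tail
            · by_cases hok' : none ∈ r'.tail
              · simp [hok']
              · have hne := pvSerials_ne_nil hr' hok'
                rw [ht] at hne
                have hpos : (pvSerials rest r.tail).length ≠ 0 :=
                  fun h => hne (List.length_eq_zero_iff.mp h)
                have hlen : (pvSerials (r :: rest) r'.tail).length =
                    (pvSerials rest r.tail).length + 1 := by
                  rw [ht, pvSerials_cons]; simp [hok]
                have hne1 : (pvSerials (r :: rest) r.tail).length ≠ 1 :=
                  ht ▸ (by omega : (pvSerials (r :: rest) r'.tail).length ≠ 1)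
                simp [PySem.Dict.mem_keys_insert, ht, hne1]
            · rw [pvSerials_cons]
              simp [PySem.Dict.mem_keys_insert, ht, Ne.symm ht]

-- ===== VERDICT (by name: the statement is the Claim_ definition above) =====
theorem find_unique_rows_withNone_spec : Claim_equal_find_unique_rows_withNone := by
  intro matrix _ _
  unfold Spec_find_unique_rows_withNone find_unique_rows_withNone find_unique_rows_withNone_alt
  rw [pvExtract, pvMainA matrix PySem.Dict.empty (by simp [PySem.Dict.keys_empty])]
  simp only [PySem.List.slice_from_one]
  rw [pvFold2]
  simp only [List.nil_append,
    show (PySem.Dict.empty : PySem.Dict (List (Option Int)) (List Int)).items = [] from rfl,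
    List.flatMap_nil, PySem.Dict.keys_empty, List.not_mem_nil]
  apply pvFlatMap_congr
  intro r hr
  rw [pvCounts]
  by_cases hok : none ∈ r.tail
  · simp [hok]
  · by_cases h1 : (pvSerials matrix r.tail).length = 1
    · simp [hok, h1, PySem.Dict.getD_empty, pvHead]
    · simp [hok, h1, PySem.Dict.getD_empty]
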